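-- pv_equiv track=rewrite | github.com/ciarand/433_assignment1 | ciphers/playfair.py | get_digraphs
-- ===== SOURCE A (Python) =====
-- def get_digraphs(plaintext):
--     """
--     Separates out the given plaintext into a set of digraphs (ending with
--     a Z if the number of characters is odd).
--     """
--
--     plaintext = plaintext.upper().strip()
--
--     digraphs = []
--
--     i = 0
--     length = len(plaintext)
--
--     while i < length:
--         first = plaintext[i]
--
--         i += 1
--         # safely grab the second letter
--         if i < length:
--             second = plaintext[i]
--         else:
--             second = 'Z'
--
--         # append the tuple to the result
--         digraphs.append((first, second))
--
--         i += 1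
--
--     return digraphs
-- ===== SOURCE B (Python) =====
-- def get_digraphs(plaintext):
--     """Pad the normalized text with a trailing 'Z' once if its length is odd,
--     then pair even- and odd-indexed characters with two strided slices."""
--     s = plaintext.upper().strip()
--     if len(s) % 2:
--         s += 'Z'
--     return list(zip(s[::2], s[1::2]))
-- ===== Notes on version B (the rewrite author's own statement) =====
-- stated objective: simpler
-- what changed: Replaces the index-stepping while loop with per-pair Z padding by a single upfront pad of the whole string followed by zipping the even- and odd-index strided slices.
import Mathlib
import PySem

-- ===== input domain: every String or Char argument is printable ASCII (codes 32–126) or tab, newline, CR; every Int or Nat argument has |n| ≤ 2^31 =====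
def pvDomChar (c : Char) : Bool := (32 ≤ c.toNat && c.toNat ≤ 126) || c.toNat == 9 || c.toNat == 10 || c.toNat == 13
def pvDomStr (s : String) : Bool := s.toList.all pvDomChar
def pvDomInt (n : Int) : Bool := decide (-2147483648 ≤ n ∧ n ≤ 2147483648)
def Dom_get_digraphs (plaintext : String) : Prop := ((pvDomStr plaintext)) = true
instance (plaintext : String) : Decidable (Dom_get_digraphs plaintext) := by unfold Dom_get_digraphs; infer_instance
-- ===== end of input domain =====

-- B pads the whole normalized string with one trailing 'Z' when its length is odd, then zips the
-- even- and odd-index strided slices; A steps an index two at a time, padding per pair. (objective: simpler)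

-- ===== PORT A =====
-- A's while loop: take first = current char, second = next char or 'Z' when the text ends,
-- append the pair and advance by two — the obvious structural recursion over the remaining text.
def goA : List Char → List (String × String)
  | [] => []
  | [a] => [(String.ofList [a], "Z")]
  | a :: b :: rest => (String.ofList [a], String.ofList [b]) :: goA rest

def get_digraphs (plaintext : String) : List (String × String) :=
  goA (PySem.Chars.strip (PySem.Chars.upper plaintext.toList))

-- ===== PORT B =====
def get_digraphs_alt (plaintext : String) : List (String × String) :=
  let t := PySem.Chars.strip (PySem.Chars.upper plaintext.toList)
  let u := if t.length % 2 = 1 then t ++ ['Z'] else t     -- s += 'Z' when len(s) is odd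
  let ev := (PySem.List.slice? u none none 2).getD []      -- s[::2]
  let od := (PySem.List.slice? u (some 1) none 2).getD []  -- s[1::2]
  (List.zip ev od).map (fun p => (String.ofList [p.1], String.ofList [p.2]))

-- ===== PRECONDITION & SPEC =====
def Spec_get_digraphs (plaintext : String) (out : List (String × String)) : Prop := out = get_digraphs_alt plaintext
instance (plaintext : String) (out : List (String × String)) : Decidable (Spec_get_digraphs plaintext out) := by unfold Spec_get_digraphs; infer_instance

-- ===== CLAIM (what is proved, stated in full; the proofs are below) =====
def Claim_equal_get_digraphs : Prop := ∀ (plaintext : String), Dom_get_digraphs plaintext → Spec_get_digraphs plaintext (get_digraphs plaintext)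

-- ===== LEMMAS AND PROOFS =====

-- the even-indexed elements of a list
def evens {α : Type} : List α → List α
  | [] => []
  | [a] => [a]
  | a :: _ :: rest => a :: evens rest

theorem evens_cons {α : Type} (a : α) (l : List α) : evens (a :: l) = a :: evens l.tail := by
  cases l <;> rfl

theorem evens_spec {α : Type} : (xs : List α) →
    List.filterMap (fun k => xs[2 * k]?) (List.range ((xs.length + 1) / 2)) = evens xs
  | [] => by simp [evens]
  | [a] => by simp [evens]
  | a :: b :: rest => by
    have h : (a :: b :: rest).length = rest.length + 2 := by simp
    rw [h]
    have hc : (rest.length + 2 + 1) / 2 = (rest.length + 1) / 2 + 1 := by omega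
    rw [hc, List.range_succ_eq_map, List.filterMap_cons, List.filterMap_map]
    simp only [Function.comp]
    have : ∀ k, (a :: b :: rest)[2 * k.succ]? = rest[2 * k]? := by
      intro k
      have : 2 * k.succ = (2 * k + 1) + 1 := by omega
      rw [this]
      simp
    rw [List.filterMap_congr (fun k _ => by rw [this k])]
    simp [evens, evens_spec rest]

theorem slice?_two {α : Type} (xs : List α) :
    PySem.List.slice? xs none none 2 = some (evens xs) := by
  rw [← evens_spec xs]
  simp only [PySem.List.slice?, PySem.List.sliceIndices]
  norm_num
  have hc : (if 0 < xs.length then (((xs.length : Int) + 2 - 1) / 2).toNat else 0)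
      = (xs.length + 1) / 2 := by split_ifs with h <;> omega
  rw [hc]
  refine List.filterMap_congr (fun k _ => ?_)
  have h1 : (2 * (k : Int)).toNat = 2 * k := by omega
  rw [h1]

theorem slice?_two_one {α : Type} (xs : List α) :
    PySem.List.slice? xs (some 1) none 2 = some (evens xs.tail) := by
  cases xs with
  | nil => rfl
  | cons a rest =>
    rw [show (a :: rest).tail = rest from rfl, ← evens_spec rest]
    simp only [PySem.List.slice?, PySem.List.sliceIndices]
    norm_num
    have hc : (if 0 < rest.length then (((rest.length : Int) + 2 - 1) / 2).toNat else 0)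
        = (rest.length + 1) / 2 := by split_ifs with h <;> omega
    rw [hc]
    refine List.filterMap_congr (fun k _ => ?_)
    have h1 : (1 + 2 * (k : Int)).toNat = (2 * k) + 1 := by omega
    rw [h1]
    simp

-- the padded text
def padZ (t : List Char) : List Char := if t.length % 2 = 1 then t ++ ['Z'] else t

theorem padZ_cons_cons (a b : Char) (rest : List Char) :
    padZ (a :: b :: rest) = a :: b :: padZ rest := by
  simp only [padZ, List.length_cons]
  have h : (rest.length + 1 + 1) % 2 = rest.length % 2 := by omega
  simp only [h]
  split_ifs <;> simp

theorem goA_eq_zip : (t : List Char) →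
    goA t = (List.zip (evens (padZ t)) (evens (padZ t).tail)).map
      (fun p => (String.ofList [p.1], String.ofList [p.2]))
  | [] => by simp [goA, padZ, evens]
  | [a] => by rfl
  | a :: b :: rest => by
    rw [padZ_cons_cons]
    have he : evens (a :: b :: padZ rest) = a :: evens (padZ rest) := by simp [evens]
    have ho : (a :: b :: padZ rest).tail = b :: padZ rest := rfl
    have ho2 : evens (b :: padZ rest) = b :: evens (padZ rest).tail := evens_cons b (padZ rest)
    rw [he, ho, ho2, List.zip_cons_cons, List.map_cons, goA, goA_eq_zip rest]

-- ===== VERDICT (by name: the statement is the Claim_ definition above) =====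
theorem get_digraphs_spec : Claim_equal_get_digraphs := by
  intro plaintext _
  unfold Spec_get_digraphs get_digraphs get_digraphs_alt
  simp only [slice?_two, slice?_two_one, Option.getD_some]
  exact goA_eq_zip _
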